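-- pv_equiv track=rewrite | github.com/sunberry00/advent-of-code | 2024/day09/day09.py | find_contiguous_space
-- ===== SOURCE A (Python) =====
-- def find_contiguous_space(disc, start_index, size_needed):
--     if start_index <= 0:
--         return -1
--
--     for i in range(start_index - size_needed + 1):
--         # Check if we have enough contiguous space starting at position i
--         is_valid = True
--         for j in range(size_needed):
--             if i + j >= len(disc) or disc[i + j] != '.':
--                 is_valid = False
--                 break
--         if is_valid:
--             return i
--     return -1
-- ===== SOURCE B (Python) =====
-- def find_contiguous_space(disc, start_index, size_needed):
--     if start_index <= 0:
--         return -1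
--     if size_needed <= 0:
--         return 0
--     limit = min(len(disc), start_index)
--     run = 0
--     for p in range(limit):
--         if disc[p] == '.':
--             run += 1
--             if run >= size_needed:
--                 return p - size_needed + 1
--         else:
--             run = 0
--     return -1
-- ===== Notes on version B (the rewrite author's own statement) =====
-- stated objective: alternative
-- what changed: Replaced A's try-every-start nested scan (restarting the dot check at each candidate index) by a single left-to-right pass over the first min(len(disc), start_index) cells that tracks the length of the current run of '.' cells and returns the window start as soon as the run reaches size_needed.
import Mathlib
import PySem

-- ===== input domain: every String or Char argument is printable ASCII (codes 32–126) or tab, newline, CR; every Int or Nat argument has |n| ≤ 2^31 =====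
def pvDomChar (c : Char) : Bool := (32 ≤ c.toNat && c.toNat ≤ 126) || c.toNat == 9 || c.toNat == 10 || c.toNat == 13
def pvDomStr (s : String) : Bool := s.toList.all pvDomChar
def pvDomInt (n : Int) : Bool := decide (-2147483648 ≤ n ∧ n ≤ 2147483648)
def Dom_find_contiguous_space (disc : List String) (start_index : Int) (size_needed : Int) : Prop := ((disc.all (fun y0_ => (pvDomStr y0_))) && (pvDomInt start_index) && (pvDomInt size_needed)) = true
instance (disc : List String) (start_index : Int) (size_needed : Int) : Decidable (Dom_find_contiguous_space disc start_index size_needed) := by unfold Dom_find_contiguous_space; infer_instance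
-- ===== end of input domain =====

-- B replaces A's try-every-start nested scan by a single left-to-right pass that tracks the
-- length of the current run of "." cells and returns as soon as the run reaches size_needed
-- (objective: alternative algorithm; a timing run did not confirm a consistent speed-up).

-- ===== PORT A =====
-- inner loop: for j in range(size_needed): if i+j >= len(disc) or disc[i+j] != '.': break/invalid
def pvA_check (disc : List String) (i : Int) : Nat → Int → Bool
  | 0, _ => true
  | n+1, j =>
    if i + j ≥ (disc.length : Int) ∨ (PySem.List.pyGet? disc (i + j)).getD "" ≠ "." then false
    else pvA_check disc i n (j + 1)

-- outer loop: for i in range(start_index - size_needed + 1): if is_valid: return i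
def pvA_loop (disc : List String) (size_needed : Int) : Nat → Int → Int
  | 0, _ => -1
  | n+1, i =>
    if pvA_check disc i size_needed.toNat 0 then i
    else pvA_loop disc size_needed n (i + 1)

def find_contiguous_space (disc : List String) (start_index : Int) (size_needed : Int) : Int :=
  if start_index ≤ 0 then -1
  else pvA_loop disc size_needed (start_index - size_needed + 1).toNat 0

-- ===== PORT B =====
-- for p in range(limit): track run of '.'s, return p - size_needed + 1 when run reaches size_needed
def pvB_scan (size_needed : Int) : List String → Int → Int → Int
  | [], _, _ => -1
  | c :: rest, p, run =>
    if c = "." then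
      if run + 1 ≥ size_needed then p - size_needed + 1
      else pvB_scan size_needed rest (p + 1) (run + 1)
    else pvB_scan size_needed rest (p + 1) 0

def find_contiguous_space_alt (disc : List String) (start_index : Int) (size_needed : Int) : Int :=
  if start_index ≤ 0 then -1
  else if size_needed ≤ 0 then 0
  else pvB_scan size_needed (disc.take (min disc.length start_index.toNat)) 0 0

-- ===== PRECONDITION & SPEC =====
def Spec_find_contiguous_space (disc : List String) (start_index : Int) (size_needed : Int) (out : Int) : Prop := out = find_contiguous_space_alt disc start_index size_needed
instance (disc : List String) (start_index : Int) (size_needed : Int) (out : Int) : Decidable (Spec_find_contiguous_space disc start_index size_needed out) := by unfold Spec_find_contiguous_space; infer_instance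

-- ===== CLAIM (what is proved, stated in full; the proofs are below) =====
def Claim_equal_find_contiguous_space : Prop := ∀ (disc : List String) (start_index : Int) (size_needed : Int), Dom_find_contiguous_space disc start_index size_needed → Spec_find_contiguous_space disc start_index size_needed (find_contiguous_space disc start_index size_needed)

-- ===== LEMMAS AND PROOFS =====

-- generic "first index i0 ≤ k < i0+n with P k, else -1" finder
def pvFirst (P : Nat → Bool) : Nat → Nat → Int
  | 0, _ => -1
  | n+1, i => if P i then (i : Int) else pvFirst P n (i + 1)

lemma pvFirst_neg (P : Nat → Bool) : ∀ (n i : Nat), (∀ k, i ≤ k → k < i + n → P k = false) →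
    pvFirst P n i = -1 := by
  intro n
  induction n with
  | zero => intro i _; rfl
  | succ m ih =>
    intro i h
    have h0 : P i = false := h i le_rfl (by omega)
    simp only [pvFirst, h0, Bool.false_eq_true, if_false]
    exact ih (i + 1) (fun k hk1 hk2 => h k (by omega) (by omega))

lemma pvFirst_pos (P : Nat → Bool) : ∀ (n i k : Nat), i ≤ k → k < i + n → P k = true →
    (∀ m, i ≤ m → m < k → P m = false) → pvFirst P n i = (k : Int) := by
  intro n
  induction n with
  | zero => intro i k h1 h2; omega
  | succ m ih =>
    intro i k h1 h2 hP hmin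
    by_cases hi : i = k
    · subst hi; simp only [pvFirst, hP, if_true]
    · have h0 : P i = false := hmin i le_rfl (by omega)
      simp only [pvFirst, h0, Bool.false_eq_true, if_false]
      exact ih (i + 1) k (by omega) (by omega) hP (fun m' hm1 hm2 => hmin m' (by omega) hm2)

lemma pvFirst_eq_of_iff (P Q : Nat → Bool) (n m : Nat)
    (h : ∀ k, (k < n ∧ P k = true) ↔ (k < m ∧ Q k = true)) :
    pvFirst P n 0 = pvFirst Q m 0 := by
  by_cases hex : ∃ k, k < n ∧ P k = true
  · classical
    have hex' := hex
    let k0 := Nat.find hex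
    have hspec : k0 < n ∧ P k0 = true := Nat.find_spec hex
    have hmin : ∀ m', m' < k0 → ¬(m' < n ∧ P m' = true) := fun m' hm' => Nat.find_min hex hm'
    have hQ : k0 < m ∧ Q k0 = true := (h k0).mp hspec
    have hA : pvFirst P n 0 = (k0 : Int) := by
      refine pvFirst_pos P n 0 k0 (Nat.zero_le _) (by omega) hspec.2 ?_
      intro m' _ hm'
      by_contra hc
      exact hmin m' hm' ⟨by omega, by simpa using hc⟩
    have hB : pvFirst Q m 0 = (k0 : Int) := by
      refine pvFirst_pos Q m 0 k0 (Nat.zero_le _) (by omega) hQ.2 ?_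
      intro m' _ hm'
      by_contra hc
      have : m' < n ∧ P m' = true := (h m').mpr ⟨by omega, by simpa using hc⟩
      exact hmin m' hm' this
    rw [hA, hB]
  · have hA : pvFirst P n 0 = -1 := by
      refine pvFirst_neg P n 0 ?_
      intro k _ hk
      by_contra hc
      exact hex ⟨k, by omega, by simpa using hc⟩
    have hB : pvFirst Q m 0 = -1 := by
      refine pvFirst_neg Q m 0 ?_
      intro k _ hk
      by_contra hc
      exact hex ⟨k, (h k).mpr ⟨by omega, by simpa using hc⟩⟩
    rw [hA, hB]

-- A's inner check decides "size_needed dots starting at i+j"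
lemma pvA_check_iff (disc : List String) : ∀ (n : Nat) (i j : Nat),
    pvA_check disc (i : Int) n (j : Int) = true ↔ ∀ t, t < n → disc[i + j + t]? = some "." := by
  intro n
  induction n with
  | zero => intro i j; simp [pvA_check]
  | succ m ih =>
    intro i j
    by_cases hd : disc[i + j]? = some "."
    · have hlt : i + j < disc.length := (List.getElem?_eq_some_iff.mp hd).1
      have hcond : ¬((i : Int) + (j : Int) ≥ (disc.length : Int) ∨
          (PySem.List.pyGet? disc ((i : Int) + (j : Int))).getD "" ≠ ".") := by
        push Not
        constructor
        · exact_mod_cast hlt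
        · have : ((i : Int) + (j : Int)) = ((i + j : Nat) : Int) := by push_cast; ring
          rw [this, PySem.List.pyGet?_natCast, hd]
          rfl
      simp only [pvA_check, if_neg hcond]
      have hj1 : ((j : Int) + 1) = ((j + 1 : Nat) : Int) := by push_cast; ring
      rw [hj1, ih i (j + 1)]
      constructor
      · intro hall t ht
        match t with
        | 0 => simpa using hd
        | t' + 1 => have := hall t' (by omega); simpa [Nat.add_assoc, Nat.add_comm 1 t', Nat.add_left_comm] using this
      · intro hall t ht
        have := hall (t + 1) (by omega)
        simpa [Nat.add_assoc, Nat.add_comm 1 t, Nat.add_left_comm] using this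
    · have hcond : ((i : Int) + (j : Int) ≥ (disc.length : Int) ∨
          (PySem.List.pyGet? disc ((i : Int) + (j : Int))).getD "" ≠ ".") := by
        by_cases hlt : i + j < disc.length
        · right
          have hv : disc[i + j]? = some (disc[i + j]'hlt) := List.getElem?_eq_getElem hlt
          have hcast : ((i : Int) + (j : Int)) = ((i + j : Nat) : Int) := by push_cast; ring
          rw [hcast, PySem.List.pyGet?_natCast, hv]
          simp only [Option.getD_some]
          intro hcc
          exact hd (by rw [hv, hcc])
        · left; exact_mod_cast Nat.le_of_not_lt hlt
      simp only [pvA_check, if_pos hcond]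
      constructor
      · intro hc; exact absurd hc (by simp)
      · intro hall
        exact absurd (hall 0 (by omega)) (by simpa using hd)

-- A's outer loop is pvFirst over the inner check
lemma pvA_loop_eq (disc : List String) (z : Int) : ∀ (n i : Nat),
    pvA_loop disc z n (i : Int) = pvFirst (fun k => pvA_check disc (k : Int) z.toNat 0) n i := by
  intro n
  induction n with
  | zero => intro i; rfl
  | succ m ih =>
    intro i
    simp only [pvA_loop, pvFirst]
    by_cases hP : pvA_check disc (i : Int) z.toNat 0 = true
    · simp [hP]
    · have h1 : ((i : Int) + 1) = ((i + 1 : Nat) : Int) := by push_cast; ring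
      simp only [hP, Bool.false_eq_true, if_false]
      rw [h1, ih (i + 1)]

-- the B-side window predicate over the truncated list T
def pvQ (T : List String) (zn : Nat) (k : Nat) : Bool :=
  decide (k + zn ≤ T.length ∧ ∀ t, t < zn → T[k + t]? = some ".")

lemma pvQ_iff (T : List String) (zn k : Nat) :
    pvQ T zn k = true ↔ (k + zn ≤ T.length ∧ ∀ t, t < zn → T[k + t]? = some ".") := by
  simp [pvQ]

-- B's single pass computes the first window start in T
lemma pvB_scan_eq (T : List String) (zn : Nat) (hz : 1 ≤ zn) :
    ∀ (rest pref : List String) (run : Nat),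
      T = pref ++ rest →
      run ≤ pref.length →
      run < zn →
      (∀ u, u < pref.length → pref.length ≤ u + run → T[u]? = some ".") →
      (run = pref.length ∨ ¬(T[pref.length - run - 1]? = some ".")) →
      (∀ k, k + zn ≤ pref.length → ¬(∀ t, t < zn → T[k + t]? = some ".")) →
      pvB_scan (zn : Int) rest (pref.length : Int) (run : Int) = pvFirst (pvQ T zn) T.length 0 := by
  intro rest
  induction rest with
  | nil =>
    intro pref run hT _ _ _ _ hnowin
    have hpl : pref.length = T.length := by rw [hT]; simp
    simp only [pvB_scan]
    symm
    refine pvFirst_neg _ _ _ ?_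
    intro k _ hk
    by_contra hc
    have hQ := (pvQ_iff T zn k).mp (by simpa using hc)
    exact hnowin k (by omega) hQ.2
  | cons c rest' ih =>
    intro pref run hT hrun hrz hdots hmax hnowin
    have hp : T[pref.length]? = some c := by
      rw [hT, List.getElem?_append_right le_rfl]
      simp
    have hlen : T.length = pref.length + 1 + rest'.length := by rw [hT]; simp; omega
    simp only [pvB_scan]
    by_cases hc : c = "."
    · rw [if_pos hc]
      by_cases hbig : (run : Int) + 1 ≥ (zn : Int)
      · rw [if_pos hbig]
        have hzr : zn = run + 1 := by omega
        have hk0 : pref.length + 1 - zn = pref.length - run := by omega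
        -- the window ending at pref.length starts at pref.length - run and is the first one
        have hQk : pvQ T zn (pref.length - run) = true := by
          apply (pvQ_iff T zn (pref.length - run)).mpr
          constructor
          · omega
          · intro t ht
            by_cases hend : pref.length - run + t = pref.length
            · rw [hend, hp, hc]
            · have hlt : pref.length - run + t < pref.length := by omega
              exact hdots _ hlt (by omega)
        have hfirst : pvFirst (pvQ T zn) T.length 0 = ((pref.length - run : Nat) : Int) := by
          refine pvFirst_pos _ _ _ _ (Nat.zero_le _) (by omega) hQk ?_
          intro m' _ hm'
          by_contra hcm
          have hQm := (pvQ_iff T zn m').mp (by simpa using hcm)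
          exact hnowin m' (by omega) hQm.2
        rw [hfirst]
        omega
      · rw [if_neg hbig]
        have h1 : (pref.length : Int) + 1 = ((pref ++ [c]).length : Int) := by simp
        have h2 : (run : Int) + 1 = ((run + 1 : Nat) : Int) := by push_cast; ring
        rw [h1, h2]
        refine ih (pref ++ [c]) (run + 1) (by rw [hT]; simp) (by simp; omega) (by omega) ?_ ?_ ?_
        · intro u hu hur
          simp only [List.length_append, List.length_cons, List.length_nil] at hu hur
          by_cases he : u = pref.length
          · rw [he, hp, hc]
          · exact hdots u (by omega) (by omega)
        · simp only [List.length_append, List.length_cons, List.length_nil]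
          have : pref.length + 1 - (run + 1) - 1 = pref.length - run - 1 := by omega
          rw [this]
          rcases hmax with h | h
          · left; omega
          · right; exact h
        · intro k hk hall
          simp only [List.length_append, List.length_cons, List.length_nil] at hk
          by_cases hke : k + zn = pref.length + 1
          · -- new window ending at pref.length: impossible since the run is too short
            rcases hmax with heq | hnd
            · -- run = pref.length: k + zn = run + 1 < zn + k + ... contradiction
              omega
            · -- position pref.length - run - 1 is inside the window and is not "."
              have hin : pref.length - run - 1 < pref.length := by omega
              have ht : pref.length - run - 1 - k < zn := by omega
              have := hall (pref.length - run - 1 - k) ht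
              have hidx : k + (pref.length - run - 1 - k) = pref.length - run - 1 := by omega
              rw [hidx] at this
              exact hnd this
          · exact hnowin k (by omega) hall
    · rw [if_neg hc]
      have h1 : (pref.length : Int) + 1 = ((pref ++ [c]).length : Int) := by simp
      have h2 : (0 : Int) = ((0 : Nat) : Int) := rfl
      rw [h1, h2]
      refine ih (pref ++ [c]) 0 (by rw [hT]; simp) (by simp) (by omega) ?_ ?_ ?_
      · intro u hu hur
        simp only [List.length_append, List.length_cons, List.length_nil] at hu hur
        omega
      · right
        simp only [List.length_append, List.length_cons, List.length_nil]
        have : pref.length + 1 - 0 - 1 = pref.length := by omega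
        rw [this, hp]
        intro hcc
        exact hc (by injection hcc)
      · intro k hk hall
        simp only [List.length_append, List.length_cons, List.length_nil] at hk
        by_cases hke : k + zn = pref.length + 1
        · have := hall (zn - 1) (by omega)
          have hidx : k + (zn - 1) = pref.length := by omega
          rw [hidx, hp] at this
          exact hc (by injection this)
        · exact hnowin k (by omega) hall

-- ===== VERDICT (by name: the statement is the Claim_ definition above) =====
theorem find_contiguous_space_spec : Claim_equal_find_contiguous_space := by
  intro disc s z _
  unfold Spec_find_contiguous_space find_contiguous_space find_contiguous_space_alt
  by_cases hs : s ≤ 0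
  · rw [if_pos hs, if_pos hs]
  · rw [if_neg hs, if_neg hs]
    have hs1 : 1 ≤ s := by omega
    by_cases hz : z ≤ 0
    · rw [if_pos hz]
      -- size_needed ≤ 0: A's first outer iteration has an empty inner loop, returns 0
      have hF : (s - z + 1).toNat = (s - z + 1).toNat - 1 + 1 := by omega
      rw [hF]
      have hzt : z.toNat = 0 := by omega
      simp only [pvA_loop, hzt]
      simp [pvA_check]
    · rw [if_neg hz]
      have hz1 : 1 ≤ z := by omega
      set zn := z.toNat with hzn
      set sn := s.toNat with hsn
      set T := disc.take (min disc.length sn) with hTdef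
      have hTlen : T.length = min disc.length sn := by simp [hTdef]
      -- A side
      have h0 : (0 : Int) = ((0 : Nat) : Int) := rfl
      rw [h0, pvA_loop_eq disc z ((s - z + 1).toNat) 0]
      -- B side
      have hB : pvB_scan z T 0 0 = pvFirst (pvQ T zn) T.length 0 := by
        have := pvB_scan_eq T zn (by omega) T [] 0 (by simp) (by simp) (by omega)
          (by intro u hu hur; simp at hu)
          (by left; simp)
          (by intro k hk; simp at hk; omega)
        simpa [show ((zn : Nat) : Int) = z by omega] using this
      rw [show (0 : Int) = ((0 : Nat) : Int) from rfl] at hB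
      rw [hB]
      -- the two pvFirsts search the same set
      apply pvFirst_eq_of_iff
      intro k
      have hWin : pvA_check disc (k : Int) zn 0 = true ↔ ∀ t, t < zn → disc[k + t]? = some "." := by
        have := pvA_check_iff disc zn k 0
        simpa using this
      constructor
      · rintro ⟨hkF, hchk⟩
        have hwin := hWin.mp hchk
        have hklen : k + zn ≤ disc.length := by
          have h' := hwin (zn - 1) (by omega)
          have := (List.getElem?_eq_some_iff.mp h').1
          omega
        have hksn : k + zn ≤ sn := by omega
        have hkT : k + zn ≤ T.length := by omega
        refine ⟨by omega, (pvQ_iff T zn k).mpr ⟨hkT, ?_⟩⟩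
        intro t ht
        have hlt : k + t < min disc.length sn := by omega
        rw [hTdef, List.getElem?_take_of_lt hlt]
        exact hwin t ht
      · rintro ⟨hkT, hQ⟩
        obtain ⟨hkz, hall⟩ := (pvQ_iff T zn k).mp hQ
        have hwin : ∀ t, t < zn → disc[k + t]? = some "." := by
          intro t ht
          have := hall t ht
          rw [hTdef, List.getElem?_take_of_lt (by omega : k + t < min disc.length sn)] at this
          exact this
        refine ⟨by omega, hWin.mpr hwin⟩
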